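-- pv_equiv track=rewrite | github.com/pkepley/aoc | 2019/aoc_day_10.py | asteroid_visibility_ranking
-- ===== SOURCE A (Python) =====
-- from math import gcd, atan2, pi
--
-- def asteroid_visibility_ranking(asteroids, pos):
--     # Asteroids other than pos
--     asteroids = [a for a in asteroids if a != pos]
--
--     # Get the raw directions from each asteroid to pos
--     directions = [(a[0] - pos[0], a[1] - pos[1]) for a in asteroids if a != pos]
--
--     # Convert the raw directions (d_raw) into re-scaled direction
--     # (d_scl) and extract number of re-scaled steps from pos (d_gcd)
--     # save result as d_gcd, d
--     offset_data = []
--     for d_raw, a in zip(directions, asteroids):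
--         d_gcd = gcd(d_raw[0], d_raw[1])
--         d_scl = (int(d_raw[0] / d_gcd), int(d_raw[1] / d_gcd))
--         offset_data.append((d_scl, d_gcd, a))
--
--     # Sort by scaled direction and number of re-scaled steps retain
--     # all distinct directions which achieve smallest number of
--     # re-scaled steps
--     offset_data.sort()
--     asteroid_vis_ranking = []
--     curr_d = None
--     for i in range(len(offset_data)):
--         d_scl, d_gcd, a = offset_data[i]
--         if d_scl != curr_d:
--             curr_d = d_scl
--             vis_rank = 1
--
--         asteroid_vis_ranking.append((a, d_scl, vis_rank))
--         vis_rank += 1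
--
--     return asteroid_vis_ranking
-- ===== SOURCE B (Python) =====
-- from math import gcd
--
-- def asteroid_visibility_ranking(asteroids, pos):
--     # Group asteroids by gcd-scaled direction, then sort directions and each
--     # bucket by (steps, asteroid) and rank within the bucket.
--     buckets = {}
--     for a in asteroids:
--         if a != pos:
--             dx, dy = a[0] - pos[0], a[1] - pos[1]
--             g = gcd(dx, dy)
--             d_scl = (int(dx / g), int(dy / g))
--             buckets[d_scl] = buckets.get(d_scl, []) + [(g, a)]
--     out = []
--     for d_scl in sorted(buckets):
--         for rank, (g, a) in enumerate(sorted(buckets[d_scl]), start=1):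
--             out.append((a, d_scl, rank))
--     return out
-- ===== Notes on version B (the rewrite author's own statement) =====
-- stated objective: alternative
-- what changed: Replaces A's single global 5-tuple sort followed by a boundary-tracking linear pass (curr_d/vis_rank state) with a group-by-direction dictionary built in one pass, then iterating the directions in sorted order and sorting each bucket by (steps, asteroid), ranking by enumerate within the bucket.
import Mathlib
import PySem

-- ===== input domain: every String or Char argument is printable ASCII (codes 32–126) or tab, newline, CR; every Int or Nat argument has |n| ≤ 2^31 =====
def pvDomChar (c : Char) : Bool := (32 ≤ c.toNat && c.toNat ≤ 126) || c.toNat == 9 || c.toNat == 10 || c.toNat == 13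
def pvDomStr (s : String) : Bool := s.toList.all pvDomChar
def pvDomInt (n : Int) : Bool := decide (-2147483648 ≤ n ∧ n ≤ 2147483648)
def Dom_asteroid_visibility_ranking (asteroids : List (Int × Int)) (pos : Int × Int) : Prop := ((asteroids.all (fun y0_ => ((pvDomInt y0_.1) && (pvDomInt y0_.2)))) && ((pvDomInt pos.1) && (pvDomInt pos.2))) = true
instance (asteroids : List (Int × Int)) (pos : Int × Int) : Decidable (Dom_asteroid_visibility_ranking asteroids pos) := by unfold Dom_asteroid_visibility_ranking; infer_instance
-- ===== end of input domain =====

-- B replaces A's single global sort + boundary-tracking pass by a group-by-direction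
-- dictionary with per-bucket sorting and enumerate-ranking (objective: alternative).

-- ===== PORT A =====
-- int(d_raw/d_gcd): exact for |d_raw| < 2^53 (Dom gives |coords| ≤ 2^31), so PySem.Int.truncdiv is exact here.
def asteroid_visibility_ranking (asteroids : List (Int × Int)) (pos : Int × Int) : List ((Int × Int) × (Int × Int) × Int) :=
  let asts := asteroids.filter (fun a => a ≠ pos)
  let directions := (asts.filter (fun a => a ≠ pos)).map (fun a => (a.1 - pos.1, a.2 - pos.2))
  let offset_data := (directions.zip asts).foldl
    (fun acc da =>
      let d_gcd : Int := (Int.gcd da.1.1 da.1.2 : Nat)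
      let d_scl := (PySem.Int.truncdiv da.1.1 d_gcd, PySem.Int.truncdiv da.1.2 d_gcd)
      acc ++ [(d_scl, d_gcd, da.2)]) []
  -- Python tuple comparison on ((dx,dy),g,(ax,ay)) is lexicographic on the 5 ints
  let sortedData := PySem.List.sorted offset_data
    (fun e => toLex (e.1.1, toLex (e.1.2, toLex (e.2.1, toLex (e.2.2.1, e.2.2.2))))) false
  let res := sortedData.foldl
    (fun (st : Option (Int × Int) × Int × List ((Int × Int) × (Int × Int) × Int)) e =>
      let curr := if some e.1 ≠ st.1 then some e.1 else st.1
      let rank : Int := if some e.1 ≠ st.1 then 1 else st.2.1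
      (curr, rank + 1, st.2.2 ++ [(e.2.2, e.1, rank)]))
    (none, 0, [])
  res.2.2

-- ===== PORT B =====
def asteroid_visibility_ranking_alt (asteroids : List (Int × Int)) (pos : Int × Int) : List ((Int × Int) × (Int × Int) × Int) :=
  let buckets := asteroids.foldl
    (fun (bs : PySem.Dict (Int × Int) (List (Int × (Int × Int)))) a =>
      if a ≠ pos then
        let dx := a.1 - pos.1
        let dy := a.2 - pos.2
        let g : Int := (Int.gcd dx dy : Nat)
        let d := (PySem.Int.truncdiv dx g, PySem.Int.truncdiv dy g)
        bs.modify d [] (fun l => l ++ [(g, a)])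
      else bs) PySem.Dict.empty
  (PySem.List.sorted buckets.keys (fun d => toLex d) false).foldl
    (fun acc d =>
      acc ++ (PySem.List.enumerate
        (PySem.List.sorted (buckets.getD d []) (fun p => toLex (p.1, toLex (p.2.1, p.2.2))) false) 1).map
        (fun q => (q.2.2, d, q.1))) []

-- ===== PRECONDITION & SPEC =====
def Spec_asteroid_visibility_ranking (asteroids : List (Int × Int)) (pos : Int × Int) (out : List ((Int × Int) × (Int × Int) × Int)) : Prop := out = asteroid_visibility_ranking_alt asteroids pos
instance (asteroids : List (Int × Int)) (pos : Int × Int) (out : List ((Int × Int) × (Int × Int) × Int)) : Decidable (Spec_asteroid_visibility_ranking asteroids pos out) := by unfold Spec_asteroid_visibility_ranking; infer_instance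

-- ===== CLAIM (what is proved, stated in full; the proofs are below) =====
def Claim_equal_asteroid_visibility_ranking : Prop := ∀ (asteroids : List (Int × Int)) (pos : Int × Int), Dom_asteroid_visibility_ranking asteroids pos → Spec_asteroid_visibility_ranking asteroids pos (asteroid_visibility_ranking asteroids pos)

-- ===== LEMMAS AND PROOFS =====

-- entry / key helpers shared by the proofs
def pvEntry (pos a : Int × Int) : (Int × Int) × Int × (Int × Int) :=
  ((PySem.Int.truncdiv (a.1 - pos.1) ((Int.gcd (a.1 - pos.1) (a.2 - pos.2) : Nat) : Int),
    PySem.Int.truncdiv (a.2 - pos.2) ((Int.gcd (a.1 - pos.1) (a.2 - pos.2) : Nat) : Int)),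
   ((Int.gcd (a.1 - pos.1) (a.2 - pos.2) : Nat) : Int), a)

def pvEnts (asteroids : List (Int × Int)) (pos : Int × Int) : List ((Int × Int) × Int × (Int × Int)) :=
  (asteroids.filter (fun a => a ≠ pos)).map (pvEntry pos)

def pvFullKey (e : (Int × Int) × Int × (Int × Int)) : Lex (Int × Lex (Int × Lex (Int × Lex (Int × Int)))) :=
  toLex (e.1.1, toLex (e.1.2, toLex (e.2.1, toLex (e.2.2.1, e.2.2.2))))

def pvGaKey (p : Int × (Int × Int)) : Lex (Int × Lex (Int × Int)) :=
  toLex (p.1, toLex (p.2.1, p.2.2))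

def pvStep (st : Option (Int × Int) × Int × List ((Int × Int) × (Int × Int) × Int))
    (e : (Int × Int) × Int × (Int × Int)) :
    Option (Int × Int) × Int × List ((Int × Int) × (Int × Int) × Int) :=
  let curr := if some e.1 ≠ st.1 then some e.1 else st.1
  let rank : Int := if some e.1 ≠ st.1 then 1 else st.2.1
  (curr, rank + 1, st.2.2 ++ [(e.2.2, e.1, rank)])

lemma pvZip_map_self {A B : Type} (f : A → B) (l : List A) :
    (l.map f).zip l = l.map (fun a => (f a, a)) := by
  induction l with
  | nil => rfl
  | cons x t ih => simp [ih]

lemma pvFullKey_inj : Function.Injective pvFullKey := by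
  intro e f h
  simp only [pvFullKey, toLex_inj, Prod.mk.injEq] at h
  obtain ⟨h1, h2, h3, h4, h5⟩ := h
  obtain ⟨⟨a, b⟩, c, d, e⟩ := e
  obtain ⟨⟨a', b'⟩, c', d', e'⟩ := f
  simp_all

lemma pvA_eq (asteroids : List (Int × Int)) (pos : Int × Int) :
    asteroid_visibility_ranking asteroids pos =
      ((PySem.List.sorted (pvEnts asteroids pos) pvFullKey false).foldl pvStep
        (none, 0, [])).2.2 := by
  simp only [asteroid_visibility_ranking]
  rw [List.filter_filter]
  simp only [Bool.and_self]
  rw [pvZip_map_self]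
  rw [List.foldl_map]
  rw [PySem.List.foldl_append_singleton_eq_map]
  simp only [List.nil_append]
  rfl

lemma pvB_eq (asteroids : List (Int × Int)) (pos : Int × Int) :
    asteroid_visibility_ranking_alt asteroids pos =
      (PySem.List.sorted (PySem.Set.ofList ((pvEnts asteroids pos).map (fun e => e.1)))
          (fun d => toLex d) false).flatMap
        (fun d => (PySem.List.enumerate
            (PySem.List.sorted (((pvEnts asteroids pos).filter (fun e => e.1 == d)).map (fun e => e.2))
              pvGaKey false) 1).map
          (fun q => (q.2.2, d, q.1))) := by
  simp only [asteroid_visibility_ranking_alt]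
  rw [PySem.List.foldl_ite_eq_foldl_filter (fun a => a ≠ pos)]
  have hb : (List.foldl
      (fun (bs : PySem.Dict (Int × Int) (List (Int × (Int × Int)))) a =>
        bs.modify
          (PySem.Int.truncdiv (a.1 - pos.1) (((a.1 - pos.1).gcd (a.2 - pos.2) : Nat) : Int),
            PySem.Int.truncdiv (a.2 - pos.2) (((a.1 - pos.1).gcd (a.2 - pos.2) : Nat) : Int))
          [] fun l => l ++ [((((a.1 - pos.1).gcd (a.2 - pos.2) : Nat) : Int), a)])
      PySem.Dict.empty (List.filter (fun x => decide (x ≠ pos)) asteroids))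
      = (pvEnts asteroids pos).foldl
        (fun bs e => bs.modify e.1 [] (fun v => v ++ [e.2])) PySem.Dict.empty :=
    (List.foldl_map (f := pvEntry pos)
      (g := fun (bs : PySem.Dict (Int × Int) (List (Int × (Int × Int)))) e =>
        bs.modify e.1 [] (fun v => v ++ [e.2]))
      (l := asteroids.filter (fun x => decide (x ≠ pos))) (init := PySem.Dict.empty)).symm
  rw [hb]
  have hk := PySem.Dict.keys_foldl_modify_key (pvEnts asteroids pos) (fun e => e.1) []
    (fun (bs : PySem.Dict (Int × Int) (List (Int × (Int × Int)))) e => fun v => v ++ [e.2]) PySem.Dict.empty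
  simp only [hk]
  rw [PySem.List.foldl_append_eq_flatMap]
  simp only [List.nil_append, PySem.Dict.keys_empty]
  apply List.flatMap_congr
  intro d _
  rw [PySem.Dict.getD_foldl_modify_append]
  simp [PySem.Dict.getD_empty]
  rfl

lemma pvPerm_flatMap_filter {A B : Type} [BEq A] [LawfulBEq A] (key : B → A) :
    ∀ (ds : List A) (l : List B), ds.Nodup → (∀ e ∈ l, key e ∈ ds) →
      (ds.flatMap (fun d => l.filter (fun e => key e == d))).Perm l := by
  intro ds
  induction ds with
  | nil =>
    intro l _ hcov
    cases l with
    | nil => simp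
    | cons x t => exact absurd (hcov x (by simp)) (by simp)
  | cons d ds ih =>
    intro l hnd hcov
    rw [List.flatMap_cons]
    have hd : d ∉ ds := (List.nodup_cons.mp hnd).1
    have hstep : ∀ d' ∈ ds, l.filter (fun e => key e == d')
        = (l.filter (fun e => !(key e == d))).filter (fun e => key e == d') := by
      intro d' hd'
      rw [List.filter_filter]
      apply List.filter_congr
      intro e _
      by_cases h : key e = d'
      · have : d' ≠ d := fun hh => hd (hh ▸ hd')
        simp [h, this]
      · simp [h]
    have hmap : (ds.flatMap (fun d' => l.filter (fun e => key e == d')))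
        = ds.flatMap (fun d' => (l.filter (fun e => !(key e == d))).filter (fun e => key e == d')) := by
      apply List.flatMap_congr
      intro d' hd'
      exact hstep d' hd'
    rw [hmap]
    have hcov' : ∀ e ∈ l.filter (fun e => !(key e == d)), key e ∈ ds := by
      intro e he
      rcases List.mem_filter.mp he with ⟨hel, hne⟩
      rcases List.mem_cons.mp (hcov e hel) with h | h
      · simp_all
      · exact h
    have := ih (l.filter (fun e => !(key e == d))) (List.nodup_cons.mp hnd).2 hcov'
    exact (this.append_left _).trans (l.filter_append_perm _)

lemma pvPairwise_flatMap {A B : Type} {R : B → B → Prop} {S : A → A → Prop}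
    (ds : List A) (f : A → List B)
    (hblk : ∀ d ∈ ds, (f d).Pairwise R)
    (hcross : ∀ d d', S d d' → ∀ e ∈ f d, ∀ e' ∈ f d', R e e')
    (hds : ds.Pairwise S) :
    (ds.flatMap f).Pairwise R := by
  induction ds with
  | nil => simp
  | cons d ds ih =>
    rw [List.flatMap_cons, List.pairwise_append]
    rcases List.pairwise_cons.mp hds with ⟨hhead, htail⟩
    refine ⟨hblk d (by simp), ih (fun x hx => hblk x (by simp [hx])) htail, ?_⟩
    intro a ha b hb
    rcases List.mem_flatMap.mp hb with ⟨d', hd', hbd'⟩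
    exact hcross d d' (hhead d' hd') a ha b hbd'

lemma pvDir_le (e f : (Int × Int) × Int × (Int × Int))
    (h : toLex e.1 < toLex f.1) : pvFullKey e ≤ pvFullKey f := by
  rw [Prod.Lex.toLex_lt_toLex] at h
  simp only [pvFullKey, Prod.Lex.toLex_le_toLex]
  rcases h with h | ⟨h1, h2⟩
  · exact Or.inl h
  · exact Or.inr ⟨h1, Or.inl h2⟩

lemma pvFix_le (d : Int × Int) (p q : Int × (Int × Int)) (h : pvGaKey p ≤ pvGaKey q) :
    pvFullKey (d, p) ≤ pvFullKey (d, q) := by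
  simp only [pvGaKey, Prod.Lex.toLex_le_toLex] at h
  simp only [pvFullKey, Prod.Lex.toLex_le_toLex]
  tauto

lemma pvPerm_flatMap_congr {A B : Type} (ds : List A) (f g : A → List B)
    (h : ∀ d ∈ ds, (f d).Perm (g d)) : (ds.flatMap f).Perm (ds.flatMap g) := by
  induction ds with
  | nil => simp
  | cons d ds ih =>
    rw [List.flatMap_cons, List.flatMap_cons]
    exact (h d (by simp)).append (ih (fun x hx => h x (by simp [hx])))

lemma pvSorted_block (d : Int × Int) (l : List (Int × (Int × Int))) :
    PySem.List.sorted (l.map (fun p => (d, p))) pvFullKey false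
      = (PySem.List.sorted l pvGaKey false).map (fun p => (d, p)) := by
  apply PySem.List.eq_of_perm_of_pairwise_le_of_injective pvFullKey pvFullKey_inj
  · exact (PySem.List.sorted_perm _ _ _).trans ((PySem.List.sorted_perm l pvGaKey false).map _).symm
  · exact PySem.List.sorted_pairwise _ _
  · exact (List.pairwise_map).mpr ((PySem.List.sorted_pairwise l pvGaKey).imp (fun h => pvFix_le d _ _ h))

lemma pvSorted_decomp (l : List ((Int × Int) × Int × (Int × Int))) :
    PySem.List.sorted l pvFullKey false
      = (PySem.List.sorted (PySem.Set.ofList (l.map (fun e => e.1))) (fun d => toLex d) false).flatMap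
          (fun d => PySem.List.sorted (l.filter (fun e => e.1 == d)) pvFullKey false) := by
  set dirs := PySem.List.sorted (PySem.Set.ofList (l.map (fun e => e.1))) (fun d => toLex d) false with hdirs
  have hperm : dirs.Perm (PySem.Set.ofList (l.map (fun e => e.1))) := PySem.List.sorted_perm _ _ _
  have hnd : dirs.Nodup := (hperm.nodup_iff).mpr (PySem.Set.nodup_ofList _)
  have hlt : dirs.Pairwise (fun a b => toLex a < toLex b) := by
    have h1 := PySem.List.sorted_pairwise (PySem.Set.ofList (l.map (fun e => e.1))) (fun d => toLex d)
    rw [← hdirs] at h1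
    exact (h1.and hnd).imp (fun ⟨hle, hne⟩ => lt_of_le_of_ne hle (by simpa [toLex_inj] using hne))
  apply PySem.List.eq_of_perm_of_pairwise_le_of_injective pvFullKey pvFullKey_inj
  · refine (PySem.List.sorted_perm _ _ _).trans ?_
    refine (pvPerm_flatMap_filter (fun e => e.1) dirs l hnd ?_).symm.trans ?_
    · intro e he
      rw [hdirs, PySem.List.mem_sorted, PySem.Set.mem_ofList]
      exact List.mem_map_of_mem he
    · exact pvPerm_flatMap_congr _ _ _ (fun d _ => (PySem.List.sorted_perm _ _ _).symm)
  · exact PySem.List.sorted_pairwise _ _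
  · apply pvPairwise_flatMap (S := fun a b => toLex a < toLex b) dirs _ (fun d _ => PySem.List.sorted_pairwise _ _) ?_ hlt
    intro d d' hdd e he e' he'
    have h1 : e.1 = d := by
      have := (List.mem_filter.mp ((PySem.List.mem_sorted _ _ _ _).mp he)).2
      simpa using this
    have h2 : e'.1 = d' := by
      have := (List.mem_filter.mp ((PySem.List.mem_sorted _ _ _ _).mp he')).2
      simpa using this
    exact pvDir_le e e' (by rw [h1, h2]; exact hdd)

lemma pvRun (d : Int × Int) (bl : List ((Int × Int) × Int × (Int × Int)))
    (h : ∀ e ∈ bl, e.1 = d) :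
    ∀ (r : Int) acc,
      bl.foldl pvStep (some d, r, acc)
        = (some d, r + bl.length,
           acc ++ (PySem.List.enumerate bl r).map (fun q => (q.2.2.2, q.2.1, q.1))) := by
  induction bl with
  | nil => intro r acc; simp [PySem.List.enumerate]
  | cons e t ih =>
    intro r acc
    have he : e.1 = d := h e (by simp)
    simp only [List.foldl_cons]
    have hstep : pvStep (some d, r, acc) e = (some d, r + 1, acc ++ [(e.2.2, e.1, r)]) := by
      simp [pvStep, he]
    rw [hstep, ih (fun x hx => h x (by simp [hx])) (r + 1) _]
    simp [PySem.List.enumerate_cons]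
    push_cast; ring

lemma pvEnter (d : Int × Int) (bl : List ((Int × Int) × Int × (Int × Int)))
    (h : ∀ e ∈ bl, e.1 = d) (hne : bl ≠ []) :
    ∀ (c : Option (Int × Int)) (r : Int) acc, c ≠ some d →
      bl.foldl pvStep (c, r, acc)
        = (some d, ((1 : Int) + bl.length),
           acc ++ (PySem.List.enumerate bl 1).map (fun q => (q.2.2.2, q.2.1, q.1))) := by
  cases bl with
  | nil => exact absurd rfl hne
  | cons e t =>
    intro c r acc hc
    have he : e.1 = d := h e (by simp)
    simp only [List.foldl_cons]
    have hstep : pvStep (c, r, acc) e = (some d, 2, acc ++ [(e.2.2, e.1, 1)]) := by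
      simp [pvStep, he, Ne.symm hc]
    rw [hstep, pvRun d t (fun x hx => h x (by simp [hx])) 2 _]
    simp [PySem.List.enumerate_cons]
    push_cast; ring

lemma pvLoop (blk : (Int × Int) → List ((Int × Int) × Int × (Int × Int))) :
    ∀ (ds : List (Int × Int)) (c : Option (Int × Int)) (r : Int) acc,
      ds.Pairwise (fun a b => a ≠ b) →
      (∀ d ∈ ds, blk d ≠ []) →
      (∀ d ∈ ds, ∀ e ∈ blk d, e.1 = d) →
      (∀ d ∈ ds, c ≠ some d) →
      ((ds.flatMap blk).foldl pvStep (c, r, acc)).2.2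
        = acc ++ ds.flatMap
            (fun d => (PySem.List.enumerate (blk d) 1).map (fun q => (q.2.2.2, q.2.1, q.1))) := by
  intro ds
  induction ds with
  | nil => intro c r acc _ _ _ _; simp
  | cons d ds ih =>
    intro c r acc hp hne hdir hc
    rw [List.flatMap_cons, List.foldl_append]
    rw [pvEnter d (blk d) (hdir d (by simp)) (hne d (by simp)) c r acc (hc d (by simp))]
    rw [ih (some d) _ _ (List.Pairwise.sublist (List.sublist_cons_self d ds) hp)
        (fun x hx => hne x (by simp [hx])) (fun x hx => hdir x (by simp [hx]))
        (fun x hx => by simpa using (List.pairwise_cons.mp hp).1 x hx)]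
    simp

lemma pvEnum_map {A B : Type} (f : A → B) (xs : List A) (s : Int) :
    PySem.List.enumerate (xs.map f) s = (PySem.List.enumerate xs s).map (fun p => (p.1, f p.2)) := by
  induction xs generalizing s <;> simp_all [PySem.List.enumerate]

-- ===== VERDICT (by name: the statement is the Claim_ definition above) =====
theorem asteroid_visibility_ranking_spec : Claim_equal_asteroid_visibility_ranking := by
  intro asteroids pos _hdom
  unfold Spec_asteroid_visibility_ranking
  rw [pvA_eq, pvB_eq, pvSorted_decomp (pvEnts asteroids pos)]
  set ents := pvEnts asteroids pos with hents
  set dirs := PySem.List.sorted (PySem.Set.ofList (ents.map (fun e => e.1))) (fun d => toLex d) false with hdirs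
  have hperm : dirs.Perm (PySem.Set.ofList (ents.map (fun e => e.1))) := PySem.List.sorted_perm _ _ _
  have hnd : dirs.Nodup := (hperm.nodup_iff).mpr (PySem.Set.nodup_ofList _)
  rw [pvLoop (fun d => PySem.List.sorted (ents.filter (fun e => e.1 == d)) pvFullKey false) dirs none 0 []
      hnd
      (by
        intro d hd
        have hmem : d ∈ ents.map (fun e => e.1) := by
          have := hperm.mem_iff.mp hd
          rwa [PySem.Set.mem_ofList] at this
        rcases List.mem_map.mp hmem with ⟨e, he, hde⟩
        rw [Ne, PySem.List.sorted_eq_nil_iff]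
        intro hfil
        have : e ∈ ents.filter (fun x => x.1 == d) := List.mem_filter.mpr ⟨he, by simp [hde]⟩
        simp [hfil] at this)
      (by
        intro d _ e he
        have := (List.mem_filter.mp ((PySem.List.mem_sorted _ _ _ _).mp he)).2
        simpa using this)
      (by intro d _; simp)]
  simp only [List.nil_append]
  apply List.flatMap_congr
  intro d hd
  have hfil : ents.filter (fun e => e.1 == d)
      = ((ents.filter (fun e => e.1 == d)).map (fun e => e.2)).map (fun p => (d, p)) := by
    rw [List.map_map]
    conv_lhs => rw [← List.map_id (ents.filter (fun e => e.1 == d))]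
    apply List.map_congr_left
    intro e he
    have : e.1 = d := by simpa using (List.mem_filter.mp he).2
    simp [Function.comp, ← this]
  conv_lhs => rw [hfil, pvSorted_block, pvEnum_map, List.map_map]
  rfl
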